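/-
  THE CONTRACTS OF THE MDCT REGION, part 2 (design/CONTRACTS.md entries 111 and 40): `init_blocksize` (setup time: five setup
  blocks, the tables, M3 + M4 for one index) and `inverse_mdct` (decode time: ONE temp block, ADO → ADOBusy → ADO; 12 segments).
  Part 1 (the vocabulary `LiveBytes`, `arg32`, `IsNeg32`, the helpers): Vorbis/Spec/Mdct.lean. The allocators' contracts:
  Vorbis/Spec/Alloc.lean (`ArenaPre`, `setup_malloc.spec`, `setup_temp_malloc.spec`, `arena_temp_restore.spec`). The decode-time
  invariant: Vorbis/Spec/DecodeInv.lean.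

      Since A A'                        (Vorbis/Arena.lean §9) "a setup block of the arena `A'` that is no block of `A`": the blocks allocated since `A`
      init_blocksize.spec others frames A k
      inverse_mdct.Pre / .spec others frames len A stored room ysz k c
                                        the precondition is "`DecodeInv others frames len A stored room ysz mem f` + the arguments";
                                        the allocated blocks are the run's, `RunBlk A len`
      inverse_mdct.Pre.ok .live .ob1 .hd3 .mdct .m6 .ado .t3 .offStack .offGap .arenaText .log2Obj .log2In
                                        what the segments use of the invariant (theorems)
      inverse_mdct.Body                 what every cut-point assertion of inverse_mdct shares (frame, footprint, the busy arena)
      inverse_mdct.At2 … At9, AtS8Head / AtS8Body / AtS8Mid, Seg1 … Seg12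
      inverse_mdct.storeOK              (Vorbis/Spec/MdctUse.lean) the footprint in the form `DecodeInv.frame_stores` consumes

  ALL FLOATING-POINT VALUES ARE OPAQUE: an SSE store writes unknown bytes into the sample buffer or the temp block.
-/
import Vorbis.Spec.Mdct
import Vorbis.Spec.Alloc
import Vorbis.Spec.DecodeInv
import Vorbis.Invariant
namespace Vorbis.Spec
open X86 X86.User Asan

/-! ### `init_blocksize` -/

/-! "The blocks allocated since the arena was `A`" — setup blocks of `A'` that are no blocks of `A` — is `Since A A'` of the arena
layer (Vorbis/Arena.lean §9; `Since.blk`, `Since.mono`, `Since.ne_old`): the tables of `init_blocksize` are NEW blocks, which is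
what makes them different from every block allocated before — `Separated`. The start_decoder statements use the same predicate. -/

/-- **`init_blocksize(rdi = f, esi = b, edx = n)`** (CONTRACTS 111), ghosts: the arena `A` at entry, `k` = the `ld` of `n`.
PRE: the allocators' `ArenaPre A others frames` (the shadow layer, `*f` live, `ArenaOK A others mem f`, the arena above the
text); `*f` inside ONE live object (what `error.spec` asks on the three out-of-memory paths; `f = &p` of stb_vorbis_open_memory's
frame); `b ∈ {0, 1}`; `n = 2 ^ k`, `6 ≤ k ≤ 13`; the global `log2_4` a live object with its contents (compute_bitreverse's `ilog`).
POST: for some later arena `A'` and live list `others'` (between 0 and 5 of the allocations succeeded): `A.Extends A'`, the temp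
side untouched, `ArenaOK A' others' v.mem f`, the shadow layer for `others'` (which only GREW: the new objects are setup blocks
of `A'`); rax is 1 or 0; rax = 1: M3 and M4 for index `b` — the five tables are setup blocks ALLOCATED BY THIS CALL of exactly
`2n, 2n, n, 2n, n/4` bytes (`Mdct.Tables (Since A A') v.mem f b n`), every entry of `bit_reverse[b]` is at most `n/2 − 4`
(`Mdct.RevOK`); rax = 0: `f->error = 3` (VORBIS_outofmem).
FOOTPRINT: `setup_memory_required` `[f+8, f+12)`, `setup_offset` `[f+128, f+132)`, `error` `[f+140, f+144)`, the five pointer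
slots of index `b` (`A` 1400, `B` 1416, `C` 1432, `window` 1448, `bit_reverse` 1464, each `+ 8b`), the FREE GAP of the arena
`[B + S, B + T)` (the new blocks and their red zones: whatever was allocated before lies outside) and its shadow. Stack: six
pushes, `sub rsp, 28H`, the return address of the call of compute_twiddle_factors and its 160 bytes: 256. -/
def init_blocksize.spec (others : List Obj) (frames : List (Nat × FrameLayout)) (A : Arena) (k : Nat) : Spec where
  pre u :=
    ArenaPre A others frames u ∧
    LiveIn others frames (u.reg .rdi).toNat Off.sizeof.stb_vorbis ∧
    arg32 u .rsi < 2 ∧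
    Mdct.Ld (arg32 u .rdx) k ∧
    Vorbis.Globals.log2_4.obj ∈ others ∧
    Log2_4In u.mem
  post u v :=
    ∃ (A' : Arena) (others' : List Obj),
      A.Extends A' ∧ A'.temps = A.temps ∧ A'.T = A.T ∧
      ArenaOK A' others' v.mem (u.reg .rdi).toNat ∧
      ShadowInv others' frames ((u.reg .rsp).toNat + 8) v.mem ∧
      (∀ o, o ∈ others → o ∈ others') ∧
      (∀ o, o ∈ others' → o ∈ others ∨ o ∈ A'.setupObjs) ∧
      (v.reg .rax = 1 ∨ v.reg .rax = 0) ∧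
      (v.reg .rax = 1 →
        Mdct.Tables (Since A A') v.mem (u.reg .rdi).toNat (arg32 u .rsi) (arg32 u .rdx) ∧
        Mdct.RevOK v.mem (stb_vorbis.bit_reverse v.mem (u.reg .rdi).toNat (arg32 u .rsi)) (arg32 u .rdx)) ∧
      (v.reg .rax = 0 → stb_vorbis.error v.mem (u.reg .rdi).toNat = 3)
  frame := 256
  writes u :=
    [⟨(u.reg .rdi).toNat + 8, (u.reg .rdi).toNat + 12⟩,
     ⟨(u.reg .rdi).toNat + 128, (u.reg .rdi).toNat + 132⟩,
     ⟨(u.reg .rdi).toNat + 140, (u.reg .rdi).toNat + 144⟩,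
     ⟨(u.reg .rdi).toNat + 1400 + 8 * arg32 u .rsi, (u.reg .rdi).toNat + 1408 + 8 * arg32 u .rsi⟩,
     ⟨(u.reg .rdi).toNat + 1416 + 8 * arg32 u .rsi, (u.reg .rdi).toNat + 1424 + 8 * arg32 u .rsi⟩,
     ⟨(u.reg .rdi).toNat + 1432 + 8 * arg32 u .rsi, (u.reg .rdi).toNat + 1440 + 8 * arg32 u .rsi⟩,
     ⟨(u.reg .rdi).toNat + 1448 + 8 * arg32 u .rsi, (u.reg .rdi).toNat + 1456 + 8 * arg32 u .rsi⟩,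
     ⟨(u.reg .rdi).toNat + 1464 + 8 * arg32 u .rsi, (u.reg .rdi).toNat + 1472 + 8 * arg32 u .rsi⟩,
     ⟨A.B + A.S, A.B + A.T⟩,
     shadowSpan (A.B + A.S) (A.B + A.T)]

@[vspec] theorem init_blocksize.spec_frame (others : List Obj) (frames : List (Nat × FrameLayout)) (A : Arena) (k : Nat) :
    (init_blocksize.spec others frames A k).frame = 256 := id rfl

@[vspec] theorem init_blocksize.spec_writes (others : List Obj) (frames : List (Nat × FrameLayout)) (A : Arena) (k : Nat)
    (u : State) :
    (init_blocksize.spec others frames A k).writes u =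
      [⟨(u.reg .rdi).toNat + 8, (u.reg .rdi).toNat + 12⟩,
       ⟨(u.reg .rdi).toNat + 128, (u.reg .rdi).toNat + 132⟩,
       ⟨(u.reg .rdi).toNat + 140, (u.reg .rdi).toNat + 144⟩,
       ⟨(u.reg .rdi).toNat + 1400 + 8 * arg32 u .rsi, (u.reg .rdi).toNat + 1408 + 8 * arg32 u .rsi⟩,
       ⟨(u.reg .rdi).toNat + 1416 + 8 * arg32 u .rsi, (u.reg .rdi).toNat + 1424 + 8 * arg32 u .rsi⟩,
       ⟨(u.reg .rdi).toNat + 1432 + 8 * arg32 u .rsi, (u.reg .rdi).toNat + 1440 + 8 * arg32 u .rsi⟩,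
       ⟨(u.reg .rdi).toNat + 1448 + 8 * arg32 u .rsi, (u.reg .rdi).toNat + 1456 + 8 * arg32 u .rsi⟩,
       ⟨(u.reg .rdi).toNat + 1464 + 8 * arg32 u .rsi, (u.reg .rdi).toNat + 1472 + 8 * arg32 u .rsi⟩,
       ⟨A.B + A.S, A.B + A.T⟩,
       shadowSpan (A.B + A.S) (A.B + A.T)] := id rfl

/-! ### `inverse_mdct`: the ghosts, the precondition, the contract -/

namespace inverse_mdct

/-- `f`, the decoder object: rdx at entry. -/
def f (ue : State) : Nat := (ue.reg .rdx).toNat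

/-- `u = buffer`, the sample buffer: rdi at entry. -/
def buf (ue : State) : Nat := (ue.reg .rdi).toNat

/-- `n`, the block size of the frame: esi at entry. -/
def n (ue : State) : Nat := arg32 ue .rsi

/-- `bt = blocktype`: ecx at entry. -/
def bt (ue : State) : Nat := arg32 ue .rcx

/-- `v = buf2`, the temp block of `2 n` bytes: `ARENA_B + T − (r8 (2 n) + 32)` (the value `setup_temp_malloc` returns for the
arena ghost `A` at entry; with ADO: `B + L − 32 − 2n`). -/
def tmp (A : Arena) (ue : State) : Nat := A.B + (A.T - (r8 (2 * n ue) + 32))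

/-- `A = f->A[bt]`, read in the entry memory. -/
def tabA (ue : State) : Nat := stb_vorbis.A ue.mem (f ue) (bt ue)

/-- `B = f->B[bt]`, read in the entry memory. -/
def tabB (ue : State) : Nat := stb_vorbis.B ue.mem (f ue) (bt ue)

/-- `C = f->C[bt]`, read in the entry memory. -/
def tabC (ue : State) : Nat := stb_vorbis.C ue.mem (f ue) (bt ue)

/-- `bitrev = f->bit_reverse[bt]`, read in the entry memory. -/
def tabR (ue : State) : Nat := stb_vorbis.bit_reverse ue.mem (f ue) (bt ue)

@[vspec] theorem f_def (ue : State) : f ue = (ue.reg .rdx).toNat := id rfl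
@[vspec] theorem buf_def (ue : State) : buf ue = (ue.reg .rdi).toNat := id rfl

/-- `n` unfolded (in the simp set `vspec`). -/
@[vspec] theorem n_def (ue : State) : n ue = (ue.reg .rsi).toNat % 2 ^ 32 := by
  unfold n
  rw [arg32_def]

/-- `bt` unfolded (in the simp set `vspec`). -/
@[vspec] theorem bt_def (ue : State) : bt ue = (ue.reg .rcx).toNat % 2 ^ 32 := by
  unfold bt
  rw [arg32_def]

/-- `tmp` unfolded (in the simp set `vspec`): the value `setup_temp_malloc.spec` gives for rax. -/
@[vspec] theorem tmp_def (A : Arena) (ue : State) :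
    tmp A ue = A.B + (A.T - (r8 (2 * ((ue.reg .rsi).toNat % 2 ^ 32)) + 32)) := by
  unfold tmp
  rw [n_def]

/-- `tabA` unfolded: the accessor at the entry memory (then `simp only [vacc, voff]` for the typed read at `f + 1400 + 8 bt`). -/
theorem tabA_def (ue : State) : tabA ue = stb_vorbis.A ue.mem (f ue) (bt ue) := id rfl

/-- `tabB` unfolded (`f + 1416 + 8 bt`). -/
theorem tabB_def (ue : State) : tabB ue = stb_vorbis.B ue.mem (f ue) (bt ue) := id rfl

/-- `tabC` unfolded (`f + 1432 + 8 bt`). -/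
theorem tabC_def (ue : State) : tabC ue = stb_vorbis.C ue.mem (f ue) (bt ue) := id rfl

/-- `tabR` unfolded (`f + 1464 + 8 bt`). -/
theorem tabR_def (ue : State) : tabR ue = stb_vorbis.bit_reverse ue.mem (f ue) (bt ue) := id rfl

/- Atoms for the frame tactics (`u_same`, `u_omega`): unfolded by their rewrite rules only (see `arg32`). -/
attribute [irreducible] f buf n bt tmp tabA tabB tabC tabR

/-- **The precondition of inverse_mdct** (CONTRACTS 40): THE DECODE-TIME INVARIANT `DecodeInv` at the entry memory for the
decoder object `f = rdx`, and the arguments. Ghosts: those of `DecodeInv` (`len` the length of the input, `A` the arena, `stored`,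
`room`, `ysz`: carried, never used), `k` (the `ld` of `n`), `c` (the channel whose buffer is passed). inverse_mdct is called at
decode time only (vorbis_decode_packet_rest.12), where the caller holds exactly this invariant. The allocated blocks are the
run's, `RunBlk A len`. What the segments' workers use of the invariant — `ok`, `live`, `ob1`, `hd3`, `mdct`, `m6`, `ado`, `t3`,
`offStack`, `offGap`, `arenaText`, `log2Obj`, `log2In` — are the theorems `inverse_mdct.Pre.<name>` below. -/
structure Pre (others : List Obj) (frames : List (Nat × FrameLayout)) (len : Nat) (A : Arena) (stored room : Int)
    (ysz : Nat → Nat) (k c : Nat) (ue : State) : Prop where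
  /-- the shadow layer (SH4: the 368 bytes of stack below are clean) -/
  shadow : ShadowPre others frames ue
  /-- THE DECODE-TIME INVARIANT at the entry memory, for the decoder object passed in rdx -/
  inv : DecodeInv others frames len A stored room ysz ue.mem (f ue)
  /-- `c` is a channel -/
  chan : (c : Int) < stb_vorbis.channels ue.mem (f ue)
  /-- the buffer passed is that channel's -/
  buffer : buf ue = stb_vorbis.channel_buffers ue.mem (f ue) c
  /-- MD2: `blocktype ∈ {0, 1}` -/
  btLt : bt ue < 2
  /-- M2: `n = blocksize[blocktype]` -/
  nEq : n ue = bsize ue.mem (f ue) (bt ue)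
  /-- `ld = k` -/
  ld : Mdct.Ld (n ue) k

/-! #### What the invariant gives inverse_mdct (the facts its segments use, under the names the workers' lemmas quote) -/

section PreFacts
variable {others : List Obj} {frames : List (Nat × FrameLayout)} {len : Nat} {A : Arena} {stored room : Int}
  {ysz : Nat → Nat} {k c : Nat} {ue : State}

/-- The arena lies above the image's text (`ArenaPre.offText` of the two allocator calls). -/
theorem Pre.arenaText (h : Pre others frames len A stored room ysz k c ue) : L.textHi ≤ A.B :=
  h.inv.arenaText

/-- The allocated blocks are lawful: in the data space, pairwise equal or disjoint. -/
theorem Pre.ok (h : Pre others frames len A stored room ysz k c ue) : BlkOK (RunBlk A len) :=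
  h.inv.ok

/-- Every allocated block is live. -/
theorem Pre.live (h : Pre others frames len A stored room ysz k c ue) :
    BlkLive (RunBlk A len) (Live (stackObjs frames ++ others)) :=
  h.inv.live

/-- OB1: `*f` is an allocated block. -/
theorem Pre.ob1 (h : Pre others frames len A stored room ysz k c ue) : RunBlk A len (objBlock (f ue)) :=
  h.inv.ob1

/-- HD3: the two block sizes are powers of two in `[64, 8192]`, `blocksize_0 ≤ blocksize_1`. -/
theorem Pre.hd3 (h : Pre others frames len A stored room ysz k c ue) : Mdct.HD3 ue.mem (f ue) :=
  Real.VorbisOK.hd3 h.inv.fb.vorbis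

/-- M2, M3, M4: the tables of both block sizes are allocated blocks of their sizes; the bit-reverse entries are in range. -/
theorem Pre.mdct (h : Pre others frames len A stored room ysz k c ue) : Mdct.MdctOK (RunBlk A len) ue.mem (f ue) :=
  h.inv.fb.vorbis.mdct

/-- M6: `channel_buffers[c]` is the allocated block of `4 b1 ≥ 4 n` bytes. -/
theorem Pre.m6 (h : Pre others frames len A stored room ysz k c ue) : Mdct.M6OK (RunBlk A len) ue.mem (f ue) :=
  h.inv.fb.vorbis.buffers.M6

/-- ADO: no temp block outstanding, `T = L`, room for `tmr + 32` bytes. -/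
theorem Pre.ado (h : Pre others frames len A stored room ysz k c ue) : ADO A others ue.mem (f ue) :=
  h.inv.fb.ado

/-- T3: the request `2 n` is at most `temp_memory_required` (from T1 and `n ≤ blocksize_1`: HD3, M2). -/
theorem Pre.t3 (h : Pre others frames len A stored room ysz k c ue) :
    2 * n ue ≤ stb_vorbis.temp_memory_required ue.mem (f ue) := by
  have hle : n ue ≤ bsize ue.mem (f ue) 1 := by
    rw [h.nEq]
    exact h.hd3.le_b1 _
  exact T3_inverse_mdct h.inv.fb.vorbis.temp hle

/-- No allocated block meets the stack region: a push, a spill, a store into a callee's frame keeps every allocated block. -/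
theorem Pre.offStack (h : Pre others frames len A stored room ysz k c ue) :
    ∀ B, RunBlk A len B → B.base + B.size ≤ 0x700000 ∨ 0x800000 ≤ B.base :=
  h.inv.offStack

/-- No allocated block meets the free part `[B + S, B + L)` of the arena, where the temp block will lie. -/
theorem Pre.offGap (h : Pre others frames len A stored room ysz k c ue) :
    ∀ B, RunBlk A len B → B.base + B.size ≤ A.B + A.S ∨ A.B + A.L ≤ B.base :=
  h.inv.offGap

/-- SH5: the global `log2_4` is a live object (ilog's check sites). -/
theorem Pre.log2Obj (h : Pre others frames len A stored room ysz k c ue) : Vorbis.Globals.log2_4.obj ∈ others :=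
  h.inv.g_log2

/-- SH7: … with its contents (`ilog(n) = ld + 1`). -/
theorem Pre.log2In (h : Pre others frames len A stored room ysz k c ue) : Log2_4In ue.mem :=
  h.inv.log2

end PreFacts

end inverse_mdct

/-- **`inverse_mdct(rdi = buffer, esi = n, rdx = f, ecx = blocktype)`** (CONTRACTS 40), ghosts `len A stored room ysz k c`.
PRE: `inverse_mdct.Pre` = the shadow clause, THE DECODE-TIME INVARIANT `DecodeInv others frames len A stored room ysz u.mem f`, and
the arguments (`buffer = channel_buffers[c]`, `blocktype < 2`, `n = blocksize[blocktype] = 2 ^ k`). POST: the shadow layer for the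
SAME objects (the temp block is released and poisoned again); ADO again for the SAME arena ghost; `*f` reads exactly as before
(`temp_offset` is written twice, final value = initial); `buffer[0 .. n)` and the temp block hold opaque bytes. FOOTPRINT:
`buffer[0 .. n)` (`4 n` bytes), the temp block `[v, v + 2n)`, `temp_offset` `[f+132, f+136)`, the shadow of the temp block and its
red zone `[v, ARENA_B + T)`. The caller re-assembles its invariant at the exit memory with `inverse_mdct.storeOK` (the footprint as
`StoreOK` spans) and `DecodeInv.frame_stores`. Stack: `push rbp`, five pushes, `sub rsp, 88H` (184 bytes, + 16 around the call of
imdct_step3_inner_s_loop), the return address of the call of imdct_step3_inner_s_loop_ld654 and its 176: 368. -/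
def inverse_mdct.spec (others : List Obj) (frames : List (Nat × FrameLayout)) (len : Nat) (A : Arena) (stored room : Int)
    (ysz : Nat → Nat) (k c : Nat) : Spec where
  pre u := inverse_mdct.Pre others frames len A stored room ysz k c u
  post u v :=
    ShadowInv others frames ((u.reg .rsp).toNat + 8) v.mem ∧
    ADO A others v.mem (inverse_mdct.f u) ∧
    (objBlock (inverse_mdct.f u)).Same u.mem v.mem
  frame := 368
  writes u :=
    [⟨inverse_mdct.buf u, inverse_mdct.buf u + 4 * inverse_mdct.n u⟩,
     ⟨inverse_mdct.tmp A u, inverse_mdct.tmp A u + 2 * inverse_mdct.n u⟩,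
     ⟨inverse_mdct.f u + 132, inverse_mdct.f u + 136⟩,
     shadowSpan (inverse_mdct.tmp A u) (A.B + A.T)]

@[vspec] theorem inverse_mdct.spec_frame (others : List Obj) (frames : List (Nat × FrameLayout)) (len : Nat) (A : Arena)
    (stored room : Int) (ysz : Nat → Nat) (k c : Nat) :
    (inverse_mdct.spec others frames len A stored room ysz k c).frame = 368 := id rfl

@[vspec] theorem inverse_mdct.spec_writes (others : List Obj) (frames : List (Nat × FrameLayout)) (len : Nat) (A : Arena)
    (stored room : Int) (ysz : Nat → Nat) (k c : Nat) (u : State) :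
    (inverse_mdct.spec others frames len A stored room ysz k c).writes u =
      [⟨inverse_mdct.buf u, inverse_mdct.buf u + 4 * inverse_mdct.n u⟩,
       ⟨inverse_mdct.tmp A u, inverse_mdct.tmp A u + 2 * inverse_mdct.n u⟩,
       ⟨inverse_mdct.f u + 132, inverse_mdct.f u + 136⟩,
       shadowSpan (inverse_mdct.tmp A u) (A.B + A.T)] := id rfl

/-! ### `inverse_mdct`: the cut-point assertions

NOTATION (CONTRACTS 40, "Notes, abbreviations and hand-over tables"): `ue` the entry state, `u = buf ue`, `v = tmp A ue`,
`n = n ue`, `n2 = n / 2` …, `A = tabA ue`, `Bt = tabB ue`, `Ct = tabC ue`, `R = tabR ue`. The frame pointer is `rbp = ue.rsp − 8`,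
the steady stack pointer `rsp = rbp − B0H = ue.rsp − 184`. A slot `[rbp − x]` is the address `ue.rsp − (8 + x)`: every slot fact
below is stated at `ue.reg .rsp − <number>`, with the slot's CONTRACTS name in its doc comment. A dword slot `d[…]` is a 4-byte
read, a qword slot `q[…]` an 8-byte read; values are natural numbers. The float scratch slots (`d[rbp−50H]`, `[rbp−48H]`,
`[rbp−58H]`, `[rbp−5CH]`, later also `[rbp−60H]`, `[rbp−40H]`, `[rbp−44H]`) are dead at every cut and never mentioned. -/

namespace inverse_mdct

/-- **What every cut-point assertion of inverse_mdct shares**, from the exit of segment 1 to the entry of the epilogue: the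
function was entered at `ue` by a call with its precondition; the text is unchanged, DF = 0 and the SSE masks set; `rbp` and the
steady `rsp`; the return address, the caller's rbp and the five saved registers in their slots; only the contract's footprint
was written; the arena is BUSY with exactly the temp block `v` of `2 n` bytes (`ADOBusy`), which is one more live object of the
shadow layer; and the four PERMANENT slots `q[rbp−78H] = f`, `d[rbp−7CH] = bt`, `d[rbp−90H] = save_point = L`, `q[rbp−68H] = v`. -/
structure Body (u₀ : State) (others : List Obj) (frames : List (Nat × FrameLayout)) (len : Nat) (A : Arena)
    (stored room : Int) (ysz : Nat → Nat) (k c : Nat) (ue : State) (ret : Word) (v : State) : Prop where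
  /-- the function was entered by a call -/
  entry : AtEntry (conv u₀) L.inverse_mdct.entry (spec others frames len A stored room ysz k c).frame ret ue
  /-- … with its precondition -/
  pre : Pre others frames len A stored room ysz k c ue
  /-- the image's text is unchanged -/
  code : CodeOK u₀ v.mem
  /-- DF = 0, the six SSE exception masks set -/
  abi : abiInv v
  /-- the frame pointer -/
  rbp : v.reg .rbp = ue.reg .rsp - 8
  /-- the steady stack pointer `rbp − B0H` -/
  rsp : v.reg .rsp = ue.reg .rsp - 184
  /-- the return address -/
  retSlot : UInt64.ofNat (v.mem.readLE (ue.reg .rsp) 8) = ret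
  /-- `[rbp]`: the caller's rbp -/
  rbpSlot : UInt64.ofNat (v.mem.readLE (ue.reg .rsp - 8) 8) = ue.reg .rbp
  /-- `[rbp − 8]`: the saved r15 -/
  r15Slot : UInt64.ofNat (v.mem.readLE (ue.reg .rsp - 16) 8) = ue.reg .r15
  /-- `[rbp − 10H]`: the saved r14 -/
  r14Slot : UInt64.ofNat (v.mem.readLE (ue.reg .rsp - 24) 8) = ue.reg .r14
  /-- `[rbp − 18H]`: the saved r13 -/
  r13Slot : UInt64.ofNat (v.mem.readLE (ue.reg .rsp - 32) 8) = ue.reg .r13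
  /-- `[rbp − 20H]`: the saved r12 -/
  r12Slot : UInt64.ofNat (v.mem.readLE (ue.reg .rsp - 40) 8) = ue.reg .r12
  /-- `[rbp − 28H]`: the saved rbx -/
  rbxSlot : UInt64.ofNat (v.mem.readLE (ue.reg .rsp - 48) 8) = ue.reg .rbx
  /-- only the footprint was written -/
  same : Mem.SameExcept ((spec others frames len A stored room ysz k c).footprint ue) ue.mem v.mem
  /-- the arena with the one temp block outstanding (T = L − 32 − 2n, `temps = [(T, 2n)]`) -/
  busy : ADOBusy (A.pushTemp (2 * n ue)) (A.newTempObj (2 * n ue) :: others) v.mem (f ue) (2 * n ue)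
  /-- the shadow layer with the temp block as one more object; the clean stack ends at the steady rsp -/
  shadow : ShadowInv (A.newTempObj (2 * n ue) :: others) frames ((ue.reg .rsp).toNat - 184) v.mem
  /-- `q[rbp − 78H] = f` -/
  fSlot : UInt64.ofNat (v.mem.readLE (ue.reg .rsp - 128) 8) = ue.reg .rdx
  /-- `d[rbp − 7CH] = bt` -/
  btSlot : v.mem.readLE (ue.reg .rsp - 132) 4 = bt ue
  /-- `d[rbp − 90H] = save_point = L` (the `temp_offset` read at entry, ADO: `T = L`) -/
  saveSlot : v.mem.readLE (ue.reg .rsp - 152) 4 = A.T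
  /-- `q[rbp − 68H] = v` -/
  vSlot : v.mem.readLE (ue.reg .rsp - 112) 8 = tmp A ue

/-- **FRAME0, the buffer part**: `q[rbp−38H] = u`, `d[rbp−44H] = n`, `q[rbp−A8H] = &u[n2]`. True from the exit of segment 1 to the
first iteration of step 8. -/
structure SlotsBuf (ue : State) (v : State) : Prop where
  /-- `q[rbp − 38H] = u` -/
  uSlot : UInt64.ofNat (v.mem.readLE (ue.reg .rsp - 64) 8) = ue.reg .rdi
  /-- `d[rbp − 44H] = n` -/
  nSlot : v.mem.readLE (ue.reg .rsp - 76) 4 = n ue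
  /-- `q[rbp − A8H] = &u[n2]` -/
  uMidSlot : v.mem.readLE (ue.reg .rsp - 176) 8 = buf ue + 4 * (n ue / 2)

/-- **FRAME0, the sizes and the twiddle pointer**: `q[rbp−40H] = A`, `d[rbp−70H] = n2`, `q[rbp−88H] = 4·n2`, `d[rbp−8CH] = n8`. True
from the exit of segment 1 until segment 7 reuses the slots. -/
structure SlotsA (ue : State) (v : State) : Prop where
  /-- `q[rbp − 40H] = A` -/
  aSlot : v.mem.readLE (ue.reg .rsp - 72) 8 = tabA ue
  /-- `d[rbp − 70H] = n2` -/
  n2Slot : v.mem.readLE (ue.reg .rsp - 120) 4 = n ue / 2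
  /-- `q[rbp − 88H] = 4·n2` -/
  n2x4Slot : v.mem.readLE (ue.reg .rsp - 144) 8 = 4 * (n ue / 2)
  /-- `d[rbp − 8CH] = n8` -/
  n8Slot : v.mem.readLE (ue.reg .rsp - 148) 4 = n ue / 8

/-- **The two slots segment 3 adds**: `q[rbp−98H] = 4·n2 − 32`, `q[rbp−A0H] = 4·n4`. True from the exit of segment 3 on. -/
structure SlotsS2 (ue : State) (v : State) : Prop where
  /-- `q[rbp − 98H] = 4·n2 − 32` -/
  n2x4m32Slot : v.mem.readLE (ue.reg .rsp - 160) 8 = 4 * (n ue / 2) - 32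
  /-- `q[rbp − A0H] = 4·n4` -/
  n4x4Slot : v.mem.readLE (ue.reg .rsp - 168) 8 = 4 * (n ue / 4)

/-- **The slots of step 3**: `d[rbp−60H] = ilog(n) = ld + 1`, `d[rbp−50H] = n2 − 1`. True from segment 5 to the end of segment 7. -/
structure SlotsStep3 (k : Nat) (ue : State) (v : State) : Prop where
  /-- `d[rbp − 60H] = ld + 1` -/
  ilogSlot : v.mem.readLE (ue.reg .rsp - 104) 4 = k + 1
  /-- `d[rbp − 50H] = n2 − 1` -/
  n2m1Slot : v.mem.readLE (ue.reg .rsp - 88) 4 = n ue / 2 - 1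

/-- **At the head of loop L1** (`loop1`, line 2692 `while (e != e_stop)`), BEFORE its first iteration (the exit of segment 1):
`r13 = u`, `rbx = A`, `r12 = &v[n2 − 2]`, `r15 = &u[n2]`; FRAME0. The loop itself is inside segment 2: recommended invariant after
`t ≤ n8` iterations `r13 = u + 16 t`, `rbx = A + 8 t`, `r12 + 8 t + 8 = v + 4·n2`, `r15` unchanged (`Mdct.L1`). -/
structure At2 (u₀ : State) (others : List Obj) (frames : List (Nat × FrameLayout)) (len : Nat) (A : Arena)
    (stored room : Int) (ysz : Nat → Nat) (k c : Nat) (ue : State) (ret : Word) (v : State) : Prop where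
  rip : v.rip = L.inverse_mdct.loop1
  body : Body u₀ others frames len A stored room ysz k c ue ret v
  sBuf : SlotsBuf ue v
  sA : SlotsA ue v
  /-- `d[rbp − 80H] = n4` -/
  n4Slot : v.mem.readLE (ue.reg .rsp - 136) 4 = n ue / 4
  r13 : (v.reg .r13).toNat = buf ue
  rbx : (v.reg .rbx).toNat = tabA ue
  r12 : (v.reg .r12).toNat + 8 = tmp A ue + 4 * (n ue / 2)
  r15 : (v.reg .r15).toNat = buf ue + 4 * (n ue / 2)

/-- **At the head of loop L2** (`loop2`, line 2701 `while (d >= buf2)`), before its first iteration (the exit of segment 2):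
`r12 = &v[n4 − 2]`, `rbx = &A[n4]`, `r13 = &u[n2 − 3]`, `r15 = v`; FRAME0. Recommended invariant inside segment 3 (`Mdct.L2`):
`r12 + 8 t + 8 = v + n`, `rbx = A + 4·n4 + 8 t`, `r13 + 16 t + 12 = u + 2 n`. -/
structure At3 (u₀ : State) (others : List Obj) (frames : List (Nat × FrameLayout)) (len : Nat) (A : Arena)
    (stored room : Int) (ysz : Nat → Nat) (k c : Nat) (ue : State) (ret : Word) (v : State) : Prop where
  rip : v.rip = L.inverse_mdct.loop2
  body : Body u₀ others frames len A stored room ysz k c ue ret v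
  sBuf : SlotsBuf ue v
  sA : SlotsA ue v
  /-- `d[rbp − 80H] = n4` -/
  n4Slot : v.mem.readLE (ue.reg .rsp - 136) 4 = n ue / 4
  r12 : (v.reg .r12).toNat + 8 = tmp A ue + 4 * (n ue / 4)
  rbx : (v.reg .rbx).toNat = tabA ue + 4 * (n ue / 4)
  r13 : (v.reg .r13).toNat + 12 = buf ue + 4 * (n ue / 2)
  r15 : (v.reg .r15).toNat = tmp A ue

/-- **At the head of the step-2 loop** (`loop3`, line 2730 `while (AA >= A)`), before its first iteration (the exit of segment
3): `rbx = &A[n2 − 8]`, `r13 = &v[n4]`, `r12 = v`, `r14 = &u[n4]`, `r15 = u`; FRAME0 and the two new slots. Recommended invariant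
inside segment 4 (`Mdct.S2`): `rbx + 32 t + 32 = A + 2 n`, the four others `+ 16 t`. -/
structure At4 (u₀ : State) (others : List Obj) (frames : List (Nat × FrameLayout)) (len : Nat) (A : Arena)
    (stored room : Int) (ysz : Nat → Nat) (k c : Nat) (ue : State) (ret : Word) (v : State) : Prop where
  rip : v.rip = L.inverse_mdct.loop3
  body : Body u₀ others frames len A stored room ysz k c ue ret v
  sBuf : SlotsBuf ue v
  sA : SlotsA ue v
  sS2 : SlotsS2 ue v
  /-- `d[rbp − 80H] = n4` -/
  n4Slot : v.mem.readLE (ue.reg .rsp - 136) 4 = n ue / 4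
  rbx : (v.reg .rbx).toNat + 32 = tabA ue + 4 * (n ue / 2)
  r13 : (v.reg .r13).toNat = tmp A ue + 4 * (n ue / 4)
  r12 : (v.reg .r12).toNat = tmp A ue
  r14 : (v.reg .r14).toNat = buf ue + 4 * (n ue / 4)
  r15 : (v.reg .r15).toNat = buf ue

/-- **After the step-2 loop** (`cut5`, the first instruction of step 3, line 2757): FRAME0 and the two slots; no live register. -/
structure At5 (u₀ : State) (others : List Obj) (frames : List (Nat × FrameLayout)) (len : Nat) (A : Arena)
    (stored room : Int) (ysz : Nat → Nat) (k c : Nat) (ue : State) (ret : Word) (v : State) : Prop where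
  rip : v.rip = L.inverse_mdct.cut5
  body : Body u₀ others frames len A stored room ysz k c ue ret v
  sBuf : SlotsBuf ue v
  sA : SlotsA ue v
  sS2 : SlotsS2 ue v
  /-- `d[rbp − 80H] = n4` -/
  n4Slot : v.mem.readLE (ue.reg .rsp - 136) 4 = n ue / 4

/-- **At the head of the first `l` loop** (`loop5`, line 2777 `for (; l < (ld−3)>>1; ++l)`) with `l = 2` (the exit of segment 5):
`r15d = 2`, `d[rbp−60H] = ld + 1`, `d[rbp−50H] = n2 − 1`, `d[rbp−48H] = n >> 5`; FRAME0. Both loops of the nest are inside segment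
6: outer invariant `2 ≤ l = r15d ≤ lmid k` (`Mdct.first_step`, `first_exit`), inner `0 ≤ i = ebx ≤ lim = r12d`, `r13d = k0`, `r14d =
k0_2`, `d[rbp−58H] = l + 1` (`Mdct.Call.firstL`, `firstL_call`). -/
structure At6 (u₀ : State) (others : List Obj) (frames : List (Nat × FrameLayout)) (len : Nat) (A : Arena)
    (stored room : Int) (ysz : Nat → Nat) (k c : Nat) (ue : State) (ret : Word) (v : State) : Prop where
  rip : v.rip = L.inverse_mdct.loop5
  body : Body u₀ others frames len A stored room ysz k c ue ret v
  sBuf : SlotsBuf ue v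
  sA : SlotsA ue v
  sS2 : SlotsS2 ue v
  s3 : SlotsStep3 k ue v
  /-- `d[rbp − 80H] = n4` -/
  n4Slot : v.mem.readLE (ue.reg .rsp - 136) 4 = n ue / 4
  /-- `d[rbp − 48H] = n >> 5` -/
  n32Slot : v.mem.readLE (ue.reg .rsp - 80) 4 = n ue / 32
  /-- `l = 2` -/
  r15 : (v.reg .r15).toNat = 2

/-- **At the head of the second `l` loop** (`loop7`, line 2785 `for (; l < ld−6; ++l)`) with `l = lmid k = max(2, (ld−3)>>1)`
(the exit of segment 6): `edi = l`, `d[rbp−80H] = n >> 5` (copied from `d[rbp−48H]`: `n4` is gone), `d[rbp−60H] = ld + 1`,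
`d[rbp−50H] = n2 − 1`; the rest of FRAME0. Both loops of the nest, the call of imdct_step3_inner_s_loop_ld654, the load of
`bit_reverse[bt]` and the step-4-5-6 set-up are inside segment 7: outer invariant `lmid k ≤ l = edi`, `d[rbp−70H] = l + 1` after the
first round; inner (`loop6`, `r` loop) `ebx = r = rlim − t`, `r13 = A + 16·k1·t` bytes, `r12d = n2 − 1 − 8 t`, `r14d = k0`, `r15d =
k0_2`, `d[rbp−58H] = k1`, `d[rbp−5CH] = lim`, `d[rbp−48H] = l + 3` (`Mdct.Call.secondL`, `secondL_call`); rsp moves by 16 around the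
call (`sub rsp, 8 ; push r14` … `add rsp, 10H`). -/
structure At7 (u₀ : State) (others : List Obj) (frames : List (Nat × FrameLayout)) (len : Nat) (A : Arena)
    (stored room : Int) (ysz : Nat → Nat) (k c : Nat) (ue : State) (ret : Word) (v : State) : Prop where
  rip : v.rip = L.inverse_mdct.loop7
  body : Body u₀ others frames len A stored room ysz k c ue ret v
  sBuf : SlotsBuf ue v
  sA : SlotsA ue v
  sS2 : SlotsS2 ue v
  s3 : SlotsStep3 k ue v
  /-- `d[rbp − 80H] = n >> 5` -/
  n32Slot : v.mem.readLE (ue.reg .rsp - 136) 4 = n ue / 32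
  /-- `l = lmid k` -/
  rdi : (v.reg .rdi).toNat = Mdct.lmid k

/-- **At the head of the step-4-5-6 loop** (`loop8`, line 2819 `while (d0 >= v)`), before its first iteration (the exit of
segment 7): `rbx = &v[n4 − 4]`, `r12 = &v[n2 − 4]`, `r13 = u`, `q[rbp−40H] = R` (the table pointer, incremented IN MEMORY by 4 per
iteration), `q[rbp−50H] = &v[n2 − 4]`, `q[rbp−58H] = 4·n2 − 16`; of FRAME0 the buffer part and `q[rbp−98H]`. M4 is about `R` as a
NUMBER (`(pre).mdct.M4`, carried to the present memory: no store of the function goes to the table). Recommended invariant inside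
segment 8 (`Mdct.S456`): `rbx + 16 t + 16 = v + n`, `r12 + 16 t + 16 = v + 2 n`, `q[rbp−40H] = R + 4 t`. -/
structure At8 (u₀ : State) (others : List Obj) (frames : List (Nat × FrameLayout)) (len : Nat) (A : Arena)
    (stored room : Int) (ysz : Nat → Nat) (k c : Nat) (ue : State) (ret : Word) (v : State) : Prop where
  rip : v.rip = L.inverse_mdct.loop8
  body : Body u₀ others frames len A stored room ysz k c ue ret v
  sBuf : SlotsBuf ue v
  sS2 : SlotsS2 ue v
  /-- `q[rbp − 40H] = R` -/
  rSlot : v.mem.readLE (ue.reg .rsp - 72) 8 = tabR ue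
  /-- `q[rbp − 50H] = &v[n2 − 4]` -/
  d1Slot : v.mem.readLE (ue.reg .rsp - 88) 8 + 16 = tmp A ue + 4 * (n ue / 2)
  /-- `q[rbp − 58H] = 4·n2 − 16` -/
  offSlot : v.mem.readLE (ue.reg .rsp - 96) 8 + 16 = 4 * (n ue / 2)
  rbx : (v.reg .rbx).toNat + 16 = tmp A ue + 4 * (n ue / 4)
  r12 : (v.reg .r12).toNat + 16 = tmp A ue + 4 * (n ue / 2)
  r13 : (v.reg .r13).toNat = buf ue

/-- **At the head of the step-7 loop** (`loop9`, line 2854 `while (d < e)`), before its first iteration (the exit of segment 8):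
`r14 = v`, `r12 = &v[n2 − 4]`, `rbx = Ct`, `q[rbp−70H] = 4·n2 − 16`; of FRAME0 the buffer part and `q[rbp−98H]`. Recommended
invariant inside segment 9 (`Mdct.S7`): `r14 = v + 16 t`, `r12 + 16 t + 16 = v + 2 n`, `rbx = Ct + 16 t`. -/
structure At9 (u₀ : State) (others : List Obj) (frames : List (Nat × FrameLayout)) (len : Nat) (A : Arena)
    (stored room : Int) (ysz : Nat → Nat) (k c : Nat) (ue : State) (ret : Word) (v : State) : Prop where
  rip : v.rip = L.inverse_mdct.loop9
  body : Body u₀ others frames len A stored room ysz k c ue ret v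
  sBuf : SlotsBuf ue v
  sS2 : SlotsS2 ue v
  /-- `q[rbp − 70H] = 4·n2 − 16` -/
  offSlot : v.mem.readLE (ue.reg .rsp - 120) 8 + 16 = 4 * (n ue / 2)
  r14 : (v.reg .r14).toNat = tmp A ue
  r12 : (v.reg .r12).toNat + 16 = tmp A ue + 4 * (n ue / 2)
  rbx : (v.reg .rbx).toNat = tabC ue

/-- **The invariant of the step-8 loop** (`loop10`, line 2910 `while (e >= v)`) after `t ≤ n16` iterations (`Mdct.S8`): `rbx =
&v[n2 − 8 − 8 t]`, `r12 = &Bt[n2 − 8 − 8 t]` (both as sums: the exit values `v − 32`, `Bt − 32` are never dereferenced), `q[rbp−38H] =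
d0 = &u[4 t]` (incremented IN MEMORY), `r13 = d1 = &u[n2 − 4 − 4 t]`, `r15 = d2 = &u[n2 + 4 t]`, `r14 = d3 = &u[n − 4 − 4 t]`. -/
structure S8Loop (u₀ : State) (others : List Obj) (frames : List (Nat × FrameLayout)) (len : Nat) (A : Arena)
    (stored room : Int) (ysz : Nat → Nat) (k c : Nat) (ue : State) (ret : Word) (t : Nat) (v : State) : Prop where
  body : Body u₀ others frames len A stored room ysz k c ue ret v
  /-- at most `n16` iterations are done -/
  le : t ≤ n ue / 16
  /-- `rbx = e = &v[n2 − 8 − 8 t]` -/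
  rbx : (v.reg .rbx).toNat + 32 * t + 32 = tmp A ue + 2 * n ue
  /-- `r12 = B = &Bt[n2 − 8 − 8 t]` -/
  r12 : (v.reg .r12).toNat + 32 * t + 32 = tabB ue + 2 * n ue
  /-- `q[rbp − 38H] = d0 = &u[4 t]` -/
  d0Slot : v.mem.readLE (ue.reg .rsp - 64) 8 = buf ue + 16 * t
  /-- `r13 = d1 = &u[n2 − 4 − 4 t]` -/
  r13 : (v.reg .r13).toNat + 16 * t + 16 = buf ue + 2 * n ue
  /-- `r15 = d2 = &u[n2 + 4 t]` -/
  r15 : (v.reg .r15).toNat = buf ue + 2 * n ue + 16 * t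
  /-- `r14 = d3 = &u[n − 4 − 4 t]` -/
  r14 : (v.reg .r14).toNat + 16 * t + 16 = buf ue + 4 * n ue

/-- At the head of the step-8 loop `loop10` (`mov rax, [rbp−68H] ; cmp rbx, rax ; jae body`): the invariant. -/
def AtS8Head (u₀ : State) (others : List Obj) (frames : List (Nat × FrameLayout)) (len : Nat) (A : Arena)
    (stored room : Int) (ysz : Nat → Nat) (k c : Nat) (ue : State) (ret : Word) (t : Nat) (v : State) : Prop :=
  v.rip = L.inverse_mdct.loop10 ∧ S8Loop u₀ others frames len A stored room ysz k c ue ret t v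

/-- At the first instruction of the step-8 body `cut22` (from the head's `jae`): the invariant and `t < n16`. -/
def AtS8Body (u₀ : State) (others : List Obj) (frames : List (Nat × FrameLayout)) (len : Nat) (A : Arena)
    (stored room : Int) (ysz : Nat → Nat) (k c : Nat) (ue : State) (ret : Word) (t : Nat) (v : State) : Prop :=
  v.rip = L.inverse_mdct.cut22 ∧ S8Loop u₀ others frames len A stored room ysz k c ue ret t v ∧ t < n ue / 16

/-- In the middle of the step-8 body `cut23` (the pointers do not move inside the body): the same. -/
def AtS8Mid (u₀ : State) (others : List Obj) (frames : List (Nat × FrameLayout)) (len : Nat) (A : Arena)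
    (stored room : Int) (ysz : Nat → Nat) (k c : Nat) (ue : State) (ret : Word) (t : Nat) (v : State) : Prop :=
  v.rip = L.inverse_mdct.cut23 ∧ S8Loop u₀ others frames len A stored room ysz k c ue ret t v ∧ t < n ue / 16

/-! ### `inverse_mdct`: the segments -/

/-- **Segment 1** (prologue, `n2 n4 n8`, `save_point`, the temp allocation, `A`, L1 set-up; 3 checks; the call of
setup_temp_malloc, which SUCCEEDS by `temp_alloc_ok` from ADO and T3 — there is no NULL test in the code; the branch `je` on
`alloc_buffer = 0` into the alloca arm is never taken: AR1 / AR5): from the entry with the precondition to the head of L1. -/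
def Seg1 (Lay : Layout) (μ : Microarch) (u₀ : State) : Prop :=
  ∀ (others : List Obj) (frames : List (Nat × FrameLayout)) (len : Nat) (A : Arena) (stored room : Int) (ysz : Nat → Nat)
    (k c : Nat) (ue : State) (ret : Word),
    AtEntry (conv u₀) L.inverse_mdct.entry (spec others frames len A stored room ysz k c).frame ret ue →
    (spec others frames len A stored room ysz k c).pre ue →
    ReachVia Lay μ WayInv ue (fun w => At2 u₀ others frames len A stored room ysz k c ue ret w)

/-- **Segment 2** (loop L1 — 6 checks per iteration, termination by EQUALITY: `Mdct.L1.test_addr` — and the L2 set-up). -/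
def Seg2 (Lay : Layout) (μ : Microarch) (u₀ : State) : Prop :=
  ∀ (others : List Obj) (frames : List (Nat × FrameLayout)) (len : Nat) (A : Arena) (stored room : Int) (ysz : Nat → Nat)
    (k c : Nat) (ue : State) (ret : Word) (v : State),
    At2 u₀ others frames len A stored room ysz k c ue ret v →
    ReachVia Lay μ WayInv v (fun w => At3 u₀ others frames len A stored room ysz k c ue ret w)

/-- **Segment 3** (loop L2 — 6 checks per iteration, unsigned test, exit value `v − 8` — and the step-2 set-up, which writes
`q[rbp−98H]`, `q[rbp−A0H]`). -/
def Seg3 (Lay : Layout) (μ : Microarch) (u₀ : State) : Prop :=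
  ∀ (others : List Obj) (frames : List (Nat × FrameLayout)) (len : Nat) (A : Arena) (stored room : Int) (ysz : Nat → Nat)
    (k c : Nat) (ue : State) (ret : Word) (v : State),
    At3 u₀ others frames len A stored room ysz k c ue ret v →
    ReachVia Lay μ WayInv v (fun w => At4 u₀ others frames len A stored room ysz k c ue ret w)

/-- **Segment 4** (the step-2 loop: 20 checks per iteration, exit value `A − 32`). -/
def Seg4 (Lay : Layout) (μ : Microarch) (u₀ : State) : Prop :=
  ∀ (others : List Obj) (frames : List (Nat × FrameLayout)) (len : Nat) (A : Arena) (stored room : Int) (ysz : Nat → Nat)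
    (k c : Nat) (ue : State) (ret : Word) (v : State),
    At4 u₀ others frames len A stored room ysz k c ue ret v →
    ReachVia Lay μ WayInv v (fun w => At5 u₀ others frames len A stored room ysz k c ue ret w)

/-- **Segment 5** (step 3, the straight part: `ilog`, imdct_step3_iter0_loop × 2, imdct_step3_inner_r_loop × 4, `l = 2`; the
callees' preconditions by `Mdct.Call.iter0`, `Mdct.Call.r1`). -/
def Seg5 (Lay : Layout) (μ : Microarch) (u₀ : State) : Prop :=
  ∀ (others : List Obj) (frames : List (Nat × FrameLayout)) (len : Nat) (A : Arena) (stored room : Int) (ysz : Nat → Nat)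
    (k c : Nat) (ue : State) (ret : Word) (v : State),
    At5 u₀ others frames len A stored room ysz k c ue ret v →
    ReachVia Lay μ WayInv v (fun w => At6 u₀ others frames len A stored room ysz k c ue ret w)

/-- **Segment 6** (the first `l` loop with its inner `i` loop: imdct_step3_inner_r_loop per `(l, i)`; runs for `ld ≥ 9` only). -/
def Seg6 (Lay : Layout) (μ : Microarch) (u₀ : State) : Prop :=
  ∀ (others : List Obj) (frames : List (Nat × FrameLayout)) (len : Nat) (A : Arena) (stored room : Int) (ysz : Nat → Nat)
    (k c : Nat) (ue : State) (ret : Word) (v : State),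
    At6 u₀ others frames len A stored room ysz k c ue ret v →
    ReachVia Lay μ WayInv v (fun w => At7 u₀ others frames len A stored room ysz k c ue ret w)

/-- **Segment 7** (the second `l` loop with its inner `r` loop: imdct_step3_inner_s_loop per `(l, r)`, runs for `ld ≥ 10` only;
then imdct_step3_inner_s_loop_ld654, the load of `bit_reverse[bt]` — 1 check —, the step-4-5-6 set-up). -/
def Seg7 (Lay : Layout) (μ : Microarch) (u₀ : State) : Prop :=
  ∀ (others : List Obj) (frames : List (Nat × FrameLayout)) (len : Nat) (A : Arena) (stored room : Int) (ysz : Nat → Nat)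
    (k c : Nat) (ue : State) (ret : Word) (v : State),
    At7 u₀ others frames len A stored room ysz k c ue ret v →
    ReachVia Lay μ WayInv v (fun w => At8 u₀ others frames len A stored room ysz k c ue ret w)

/-- **Segment 8** (the step-4-5-6 loop: 18 checks per iteration, M4 at `u[k4 + q]`: `Mdct.RevOK.site_u`; the load of `C[bt]`, the
step-7 set-up). -/
def Seg8 (Lay : Layout) (μ : Microarch) (u₀ : State) : Prop :=
  ∀ (others : List Obj) (frames : List (Nat × FrameLayout)) (len : Nat) (A : Arena) (stored room : Int) (ysz : Nat → Nat)
    (k c : Nat) (ue : State) (ret : Word) (v : State),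
    At8 u₀ others frames len A stored room ysz k c ue ret v →
    ReachVia Lay μ WayInv v (fun w => At9 u₀ others frames len A stored room ysz k c ue ret w)

/-- **Segment 9** (the step-7 loop: 12 checks per iteration; the load of `B[bt]`, the step-8 set-up): to the head of the step-8
loop with `t = 0`. -/
def Seg9 (Lay : Layout) (μ : Microarch) (u₀ : State) : Prop :=
  ∀ (others : List Obj) (frames : List (Nat × FrameLayout)) (len : Nat) (A : Arena) (stored room : Int) (ysz : Nat → Nat)
    (k c : Nat) (ue : State) (ret : Word) (v : State),
    At9 u₀ others frames len A stored room ysz k c ue ret v →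
    ReachVia Lay μ WayInv v (fun w => AtS8Head u₀ others frames len A stored room ysz k c ue ret 0 w)

/-- **Segment 10** (the step-8 body, first half: 16 checks): to the middle of the body. -/
def Seg10 (Lay : Layout) (μ : Microarch) (u₀ : State) : Prop :=
  ∀ (others : List Obj) (frames : List (Nat × FrameLayout)) (len : Nat) (A : Arena) (stored room : Int) (ysz : Nat → Nat)
    (k c : Nat) (ue : State) (ret : Word) (t : Nat) (v : State),
    AtS8Body u₀ others frames len A stored room ysz k c ue ret t v →
    ReachVia Lay μ WayInv v (fun w => AtS8Mid u₀ others frames len A stored room ysz k c ue ret t w)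

/-- **Segment 11** (the step-8 body, second half: 16 checks, the six pointer steps): to the head with `t + 1`. -/
def Seg11 (Lay : Layout) (μ : Microarch) (u₀ : State) : Prop :=
  ∀ (others : List Obj) (frames : List (Nat × FrameLayout)) (len : Nat) (A : Arena) (stored room : Int) (ysz : Nat → Nat)
    (k c : Nat) (ue : State) (ret : Word) (t : Nat) (v : State),
    AtS8Mid u₀ others frames len A stored room ysz k c ue ret t v →
    ReachVia Lay μ WayInv v (fun w => AtS8Head u₀ others frames len A stored room ysz k c ue ret (t + 1) w)

/-- **Segment 12** (the step-8 loop test; the call of arena_temp_restore with `save_point = L` — `ADOBusy.restore`, `ADO.roundtrip`: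
the arena ghost and the live list are those of the entry again —; the epilogue `lea rsp, [rbp−28H]` and six pops): into the body
(`t < n16`), or to the state after the `ret` (`t = n16`): the contract's `Returned`. -/
def Seg12 (Lay : Layout) (μ : Microarch) (u₀ : State) : Prop :=
  ∀ (others : List Obj) (frames : List (Nat × FrameLayout)) (len : Nat) (A : Arena) (stored room : Int) (ysz : Nat → Nat)
    (k c : Nat) (ue : State) (ret : Word) (t : Nat) (v : State),
    AtS8Head u₀ others frames len A stored room ysz k c ue ret t v →
    ReachVia Lay μ WayInv v (fun w => AtS8Body u₀ others frames len A stored room ysz k c ue ret t w ∨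
      Returned (conv u₀) (spec others frames len A stored room ysz k c) ue ret w)

end inverse_mdct

end Vorbis.Spec
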